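-- pv_equiv track=rewrite | github.com/hoangduongngg/Python-Basic | Bien_va_kieu_du_lieu_don_gian/PY01004_Nguyen_to.py | Check
-- ===== SOURCE A (Python) =====
-- import math
--
-- def Check(n):
--     k=0
--     for i in range(1,n):
--         if math.gcd(i,n)==1:
--             k+=1
--     if SNT(k):
--         return 1
--     return 0
--
-- def SNT(n):
--     if n==2:
--         return 1
--     if n%2 ==0 or n<2:
--         return 0
--     for i in range(3,int(math.sqrt(n))+1,2):
--         if n%i == 0:
--             return 0
--     return 1
-- ===== SOURCE B (Python) =====
-- def Check(n):
--     # totient via prime factorization in O(sqrt n); n < 2 gives count 0, not prime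
--     if n < 2:
--         return 0
--     m = n
--     phi = n
--     p = 2
--     while p * p <= m:
--         if m % p == 0:
--             while m % p == 0:
--                 m //= p
--             phi -= phi // p
--         p += 1
--     if m > 1:
--         phi -= phi // m
--     return 1 if _is_prime(phi) else 0
--
-- def _is_prime(k):
--     if k < 2:
--         return False
--     d = 2
--     while d * d <= k:
--         if k % d == 0:
--             return False
--         d += 1
--     return True
-- ===== Notes on version B (the rewrite author's own statement) =====
-- stated objective: faster
-- what changed: B computes Euler's totient by trial-division prime factorization (O(sqrt n)) instead of A's gcd count over range(1,n), and tests its primality by plain trial division instead of A's odd-step sqrt loop.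
import Mathlib
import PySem

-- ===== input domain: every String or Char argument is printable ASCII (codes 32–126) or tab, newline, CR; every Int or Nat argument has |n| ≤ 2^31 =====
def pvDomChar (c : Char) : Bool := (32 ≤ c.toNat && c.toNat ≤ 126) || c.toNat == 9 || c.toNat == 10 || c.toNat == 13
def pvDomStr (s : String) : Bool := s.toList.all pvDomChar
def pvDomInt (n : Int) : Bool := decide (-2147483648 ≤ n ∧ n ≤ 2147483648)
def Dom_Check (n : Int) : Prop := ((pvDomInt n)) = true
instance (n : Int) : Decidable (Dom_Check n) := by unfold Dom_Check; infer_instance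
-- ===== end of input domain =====

-- B replaces A's coprime-counting loop over range(1,n) by Euler's totient computed from a
-- trial-division prime factorization, and A's odd-step primality loop by plain trial division.

-- ===== PORT A =====
-- 'for i in range(3,int(math.sqrt(n))+1,2): if n%i==0: return 0' — early-return loop.
-- int(math.sqrt(n)) equals the integer square root for every nonnegative argument SNT
-- receives on the stated domain (|n| ≤ 2^31 < 2^52), ported as Nat.sqrt (exact there).
def sntLoop (n : Int) (l : List Int) : Int :=
  match l with
  | [] => 1
  | i :: t => if PySem.Int.mod n i = 0 then 0 else sntLoop n t

def SNT (n : Int) : Int :=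
  if n = 2 then 1
  else if PySem.Int.mod n 2 = 0 ∨ n < 2 then 0
  else sntLoop n (PySem.List.pyRange 3 ((Nat.sqrt n.toNat : Int) + 1) 2)

def Check (n : Int) : Int :=
  let k : Int := (PySem.List.pyRange 1 n).foldl
    (fun k i => if Int.gcd i n = 1 then k + 1 else k) 0
  if SNT k ≠ 0 then 1 else 0

-- ===== PORT B =====
-- after the 'n < 2' guard every Python int in Source B stays nonnegative; the port carries
-- them as Nat (Python's // and % on nonnegative ints coincide with Nat's / and %).
-- 'while m % p == 0: m //= p'; the guards '2 ≤ p', 'm ≠ 0' only make the recursion total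
def stripFac (p m : Nat) : Nat :=
  if h : 2 ≤ p ∧ m % p = 0 ∧ m ≠ 0 then stripFac p (m / p) else m
termination_by m
decreasing_by exact Nat.div_lt_self (Nat.pos_of_ne_zero h.2.2) (by omega)

-- termination helper for phiLoop (cited in its decreasing_by)
theorem stripFac_le (p m : Nat) : stripFac p m ≤ m := by
  fun_induction stripFac p m with
  | case1 m h ih => exact le_trans ih (Nat.div_le_self _ _)
  | case2 m h => exact le_refl m

-- the 'while p*p <= m' loop of Source B, returning the final (m, phi)
def phiLoop (m phi p : Nat) : Nat × Nat :=
  if h : p * p ≤ m ∧ 2 ≤ p then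
    if m % p = 0 then
      phiLoop (stripFac p m) (phi - phi / p) (p + 1)
    else phiLoop m phi (p + 1)
  else (m, phi)
termination_by m + 1 - p
decreasing_by
  · have h1 := stripFac_le p m
    have h2 : p ≤ p * p := Nat.le_mul_of_pos_left p (by omega)
    omega
  · have h2 : p ≤ p * p := Nat.le_mul_of_pos_left p (by omega)
    omega

-- the 'while d*d <= k' trial-division loop of _is_prime
def primLoop (k d : Nat) : Bool :=
  if h : d * d ≤ k ∧ 2 ≤ d then
    if k % d = 0 then false else primLoop k (d + 1)
  else true
termination_by k + 1 - d
decreasing_by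
  have h2 : d ≤ d * d := Nat.le_mul_of_pos_left d (by omega)
  omega

def isPrimeTrial (k : Nat) : Bool :=
  if k < 2 then false else primLoop k 2

def Check_alt (n : Int) : Int :=
  if n < 2 then 0
  else
    let n0 := n.toNat
    let r := phiLoop n0 n0 2
    let phi := if 1 < r.1 then r.2 - r.2 / r.1 else r.2
    if isPrimeTrial phi then 1 else 0

-- ===== PRECONDITION & SPEC =====
def Spec_Check (n : Int) (out : Int) : Prop := out = Check_alt n
instance (n : Int) (out : Int) : Decidable (Spec_Check n out) := by unfold Spec_Check; infer_instance

-- ===== CLAIM (what is proved, stated in full; the proofs are below) =====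
def Claim_equal_Check : Prop := ∀ (n : Int), Dom_Check n → Spec_Check n (Check n)

-- ===== LEMMAS AND PROOFS =====

-- ---- generic counting ----
theorem sum_range_ite_eq_countP (M : Nat) (p : Nat → Prop) [DecidablePred p] :
    (∑ a ∈ Finset.range M, if p a then 1 else 0) = (List.range M).countP (fun a => decide (p a)) := by
  induction M with
  | zero => rfl
  | succ M ih =>
      rw [Finset.sum_range_succ, List.range_succ]
      simp [List.countP_append, ih]

theorem countP_range_totient (N : Nat) :
    (List.range N).countP (fun a => decide (N.Coprime a)) = N.totient := by
  rw [Nat.totient_eq_card_coprime, Finset.card_filter, sum_range_ite_eq_countP]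

-- ---- A side: the counting loop computes the totient ----
theorem kA_eq_totient (n : Int) (h : 2 ≤ n) :
    ((PySem.List.pyRange 1 n).foldl (fun k i => if Int.gcd i n = 1 then k + 1 else k) 0 : Int)
      = (Nat.totient n.toNat : Int) := by
  rw [PySem.List.foldl_ite_add_one, PySem.List.pyRange_one, List.countP_map]
  set N := n.toNat with hN
  have hc : n = (N : Int) := by omega
  have hN2 : 2 ≤ N := by omega
  have hrange : List.range N = 0 :: (List.range (N - 1)).map Nat.succ := by
    conv_lhs => rw [show N = (N - 1) + 1 by omega]
    exact List.range_succ_eq_map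
  have htot := countP_range_totient N
  rw [hrange, List.countP_cons, List.countP_map] at htot
  have h0 : (decide (N.Coprime 0)) = false := by
    simp [Nat.coprime_zero_right]; omega
  rw [h0] at htot
  norm_num at htot
  rw [show (n - 1).toNat = N - 1 by omega]
  rw [← htot, zero_add]
  congr 1
  apply List.countP_congr
  intro k _
  have hk : ((1 : Int) + (k : Int)) = ((1 + k : Nat) : Int) := by push_cast; ring
  simp only [hc, hk, Function.comp]
  rw [Int.gcd_natCast_natCast]
  simp [Nat.Coprime, Nat.gcd_comm, Nat.succ_eq_add_one, Nat.add_comm]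

-- ---- A side: the primality check SNT decides Nat.Prime ----
theorem sntLoop_eq (n : Int) (l : List Int) :
    sntLoop n l = if ∀ i ∈ l, ¬ (PySem.Int.mod n i = 0) then 1 else 0 := by
  induction l with
  | nil => simp [sntLoop]
  | cons i t ih =>
      by_cases h : PySem.Int.mod n i = 0
      · simp [sntLoop, h]
      · simp only [sntLoop, if_neg h, ih]
        have hiff : (∀ j ∈ i :: t, ¬ PySem.Int.mod n j = 0) ↔ (∀ j ∈ t, ¬ PySem.Int.mod n j = 0) := by
          simp [h]
        exact (if_congr hiff rfl rfl).symm

theorem SNT_nat (K : Nat) : SNT (K : Int) = if Nat.Prime K then 1 else 0 := by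
  unfold SNT
  by_cases h2 : K = 2
  · subst h2; norm_num [Nat.prime_two]
  · rw [if_neg (by exact_mod_cast h2)]
    by_cases hev : 2 ∣ K
    · have hm : PySem.Int.mod (K : Int) 2 = 0 :=
        (PySem.Int.mod_eq_zero_iff_dvd _ _).mpr (by exact_mod_cast hev)
      rw [if_pos (Or.inl hm)]
      have hnp : ¬ Nat.Prime K := by
        intro hp
        rcases (Nat.Prime.eq_one_or_self_of_dvd hp 2 hev) with h | h
        · omega
        · exact h2 h.symm
      simp [hnp]
    · by_cases hlt : K < 2
      · have hK1 : K = 1 := by omega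
        subst hK1; decide
      · have hK3 : 3 ≤ K := by omega
        have hmod : ¬ PySem.Int.mod (K : Int) 2 = 0 := by
          rw [PySem.Int.mod_eq_zero_iff_dvd]
          exact_mod_cast hev
        rw [if_neg (by
          push_neg
          refine ⟨hmod, ?_⟩
          have h3' : (3 : Int) ≤ (K : Int) := by exact_mod_cast hK3
          omega)]
        rw [sntLoop_eq]
        have hsq : ((K : Int)).toNat = K := Int.toNat_natCast K
        by_cases hp : Nat.Prime K
        · rw [if_pos hp, if_pos]
          intro i hi hmod0
          rw [PySem.List.mem_pyRange_iff_of_pos (by norm_num)] at hi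
          obtain ⟨h3i, hilt, -⟩ := hi
          have hidvd : (i : Int) ∣ (K : Int) := by
            rw [← PySem.Int.mod_eq_zero_iff_dvd]; exact hmod0
          have hj : i = ((i.toNat : Nat) : Int) := by omega
          rw [hsq] at hilt
          have hjdvd : i.toNat ∣ K := by
            rw [hj] at hidvd; exact_mod_cast hidvd
          exact (Nat.prime_def_le_sqrt.mp hp).2 i.toNat (by omega) (by omega) hjdvd
        · rw [if_neg hp, if_neg]
          push_neg
          rw [Nat.prime_def_le_sqrt] at hp
          push_neg at hp
          obtain ⟨m, hm2, hmsq, hmdvd⟩ := hp (by omega)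
          have hmodd : ¬ 2 ∣ m := fun hd => hev (hd.trans hmdvd)
          have hm3 : 3 ≤ m := by omega
          refine ⟨(m : Int), ?_, ?_⟩
          · rw [PySem.List.mem_pyRange_iff_of_pos (by norm_num), hsq]
            refine ⟨by exact_mod_cast hm3, by omega, by omega⟩
          · rw [PySem.Int.mod_eq_zero_iff_dvd]
            exact_mod_cast hmdvd

-- ---- B side: trial-division primality ----
theorem primLoop_eq (k d : Nat) (hd : 2 ≤ d) :
    (primLoop k d = true ↔ ∀ m, d ≤ m → m * m ≤ k → ¬ m ∣ k) := by
  revert hd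
  fun_induction primLoop k d with
  | case1 d h hdvd =>
      intro _
      simp only [Bool.false_eq_true, false_iff]
      push_neg
      exact ⟨d, le_rfl, h.1, Nat.dvd_of_mod_eq_zero hdvd⟩
  | case2 d h hndvd ih =>
      intro hd
      rw [ih (by omega)]
      constructor
      · intro H m hdm hmk
        rcases Nat.eq_or_lt_of_le hdm with rfl | hlt
        · exact fun hdk => hndvd (Nat.mod_eq_zero_of_dvd hdk)
        · exact H m (by omega) hmk
      · intro H m hdm hmk
        exact H m (by omega) hmk
  | case3 d h =>
      intro hd
      refine ⟨fun _ m hdm hmk hdvd => ?_, fun _ => rfl⟩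
      have hsq : d * d ≤ m * m := Nat.mul_le_mul hdm hdm
      exact h ⟨by omega, hd⟩

theorem isPrimeTrial_iff (k : Nat) : isPrimeTrial k = true ↔ Nat.Prime k := by
  unfold isPrimeTrial
  by_cases h : k < 2
  · simp only [if_pos h, Bool.false_eq_true, false_iff]
    intro hp; have := hp.two_le; omega
  · rw [if_neg h, primLoop_eq k 2 le_rfl, Nat.prime_def_le_sqrt]
    constructor
    · exact fun H => ⟨by omega, fun m h2 hsq => H m h2 (Nat.le_sqrt.mp hsq)⟩
    · exact fun ⟨_, H⟩ m h2 hmk => H m h2 (Nat.le_sqrt.mpr hmk)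

-- ---- B side: stripFac removes exactly the p-part ----
theorem stripFac_spec (p m : Nat) (hp : 2 ≤ p) : m ≠ 0 →
    ∃ e, m = p ^ e * stripFac p m ∧ ¬ p ∣ stripFac p m ∧ stripFac p m ≠ 0 := by
  fun_induction stripFac p m with
  | case1 m h ih =>
      intro _
      have hdvd : p ∣ m := Nat.dvd_of_mod_eq_zero h.2.1
      have hple : p ≤ m := Nat.le_of_dvd (Nat.pos_of_ne_zero h.2.2) hdvd
      have hm' : m / p ≠ 0 := by
        have := Nat.div_pos hple (by omega); omega
      obtain ⟨e, he, hnd, hne⟩ := ih hm'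
      refine ⟨e + 1, ?_, hnd, hne⟩
      calc m = p * (m / p) := (Nat.mul_div_cancel' hdvd).symm
        _ = p * (p ^ e * stripFac p (m / p)) := by rw [← he]
        _ = p ^ (e + 1) * stripFac p (m / p) := by ring
  | case2 m h =>
      intro hm
      have hnd : ¬ p ∣ m := by
        intro hd
        exact h ⟨hp, Nat.mod_eq_zero_of_dvd hd, hm⟩
      exact ⟨0, by simp, hnd, hm⟩

-- truncated-subtraction identity used twice below
theorem mul_sub_one_key (T P X : Nat) : T * (P * X) - T * X = T * ((P - 1) * X) := by
  calc T * (P * X) - T * X = T * (P * X) - T * (1 * X) := by rw [one_mul]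
    _ = T * (P * X - 1 * X) := (Nat.mul_sub T _ _).symm
    _ = T * ((P - 1) * X) := by rw [← Nat.sub_mul]

-- ---- B side: the factorization loop computes a multiple of the totient ----
theorem phiLoop_spec (m phi p : Nat) :
    2 ≤ p → 1 ≤ m → (∀ q, Nat.Prime q → q ∣ m → p ≤ q) →
    ∀ t, 1 ≤ t → phi = t * m →
    (if 1 < (phiLoop m phi p).1
      then (phiLoop m phi p).2 - (phiLoop m phi p).2 / (phiLoop m phi p).1
      else (phiLoop m phi p).2) = t * Nat.totient m := by
  fun_induction phiLoop m phi p with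
  | case1 m phi p h hdvd ih =>
      intro hp hm hfac t ht hphi
      have hpdvd : p ∣ m := Nat.dvd_of_mod_eq_zero hdvd
      -- p is prime: its least prime factor divides m, hence is ≥ p, hence = p
      have hpprime : Nat.Prime p := by
        have h1 : p.minFac ∣ m := (Nat.minFac_dvd p).trans hpdvd
        have h2 : Nat.Prime p.minFac := Nat.minFac_prime (by omega)
        have h3 : p ≤ p.minFac := hfac _ h2 h1
        have h4 : p.minFac ≤ p := Nat.minFac_le (by omega)
        have h5 : p.minFac = p := le_antisymm h4 h3
        rw [← h5]; exact h2
      obtain ⟨e, hme, hndvd, hne⟩ := stripFac_spec p m (by omega) (by omega)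
      generalize hs : stripFac p m = s at hme hndvd hne ih ⊢
      have he1 : 1 ≤ e := by
        rcases Nat.eq_zero_or_pos e with rfl | h'
        · rw [pow_zero, one_mul] at hme
          exact absurd (hme ▸ hpdvd) hndvd
        · exact h'
      have hpe : p ^ e = p * p ^ (e - 1) := by
        conv_lhs => rw [show e = (e - 1) + 1 from by omega]
        rw [pow_succ]; ring
      have h1 : m = p * (p ^ (e - 1) * s) := by
        rw [hme, hpe]; ring
      have hmp : m / p = p ^ (e - 1) * s := by
        rw [h1, Nat.mul_div_cancel_left _ (by omega : 0 < p)]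
      have hphidiv : phi / p = t * (m / p) := by
        rw [hphi, Nat.mul_div_assoc t hpdvd]
      have hstep : phi - phi / p = (t * (p ^ (e - 1) * (p - 1))) * s := by
        rw [hphidiv, hphi, hmp, h1, mul_sub_one_key]
        ring
      have hres := ih (by omega) (by omega)
        (fun q hq hqd => by
          have hq1 : q ∣ m := hqd.trans ⟨p ^ e, by rw [hme]; ring⟩
          have hq2 : p ≤ q := hfac q hq hq1
          rcases Nat.eq_or_lt_of_le hq2 with rfl | hq3
          · exact absurd hqd hndvd
          · omega)
        (t * (p ^ (e - 1) * (p - 1))) (by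
          have hx : 1 ≤ p - 1 := by omega
          have hy : 1 ≤ p ^ (e - 1) := Nat.one_le_pow _ _ (by omega)
          exact Nat.one_le_iff_ne_zero.mpr (by positivity)) hstep
      rw [hres, hme]
      have hcop : (p ^ e).Coprime s :=
        Nat.Coprime.pow_left e ((Nat.Prime.coprime_iff_not_dvd hpprime).mpr hndvd)
      rw [Nat.totient_mul hcop, Nat.totient_prime_pow hpprime (by omega)]
      ring
  | case2 m phi p h hndvd ih =>
      intro hp hm hfac t ht hphi
      exact ih (by omega) hm
        (fun q hq hqd => by
          have hq2 : p ≤ q := hfac q hq hqd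
          rcases Nat.eq_or_lt_of_le hq2 with rfl | hq3
          · exact absurd (Nat.mod_eq_zero_of_dvd hqd) hndvd
          · omega)
        t ht hphi
  | case3 m phi p h =>
      intro hp hm hfac t ht hphi
      rcases Nat.eq_or_lt_of_le hm with rfl | hm2
      · rw [if_neg (by omega)]
        simp [hphi, Nat.totient_one]
      · -- m ≥ 2 and p*p > m with all prime factors ≥ p ⇒ m is prime
        have hmp : Nat.Prime m := by
          by_contra hnp
          have hf1 : Nat.Prime m.minFac := Nat.minFac_prime (by omega)
          have hf2 : p ≤ m.minFac := hfac _ hf1 (Nat.minFac_dvd m)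
          have hf3 : m.minFac ^ 2 ≤ m := Nat.minFac_sq_le_self (by omega) hnp
          have hf4 : p * p ≤ m.minFac * m.minFac := Nat.mul_le_mul hf2 hf2
          have hf5 : ¬ (p * p ≤ m) := fun hc => h ⟨hc, hp⟩
          have hf6 : m.minFac ^ 2 = m.minFac * m.minFac := by ring
          omega
        rw [if_pos (by omega)]
        rw [hphi, Nat.totient_prime hmp, Nat.mul_div_assoc t dvd_rfl,
          Nat.div_self (by omega), Nat.mul_one]
        have h6 : t * (m - 1) = t * m - t * 1 := Nat.mul_sub t m 1
        omega

-- ===== VERDICT (by name: the statement is the Claim_ definition above) =====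
theorem Check_spec : Claim_equal_Check := by
  unfold Claim_equal_Check Spec_Check
  intro n _
  by_cases hn : n < 2
  · simp only [Check, Check_alt]
    rw [if_pos hn, PySem.List.pyRange_one_eq_nil (by omega : n ≤ 1)]
    simp only [List.foldl_nil]
    have hS : SNT 0 = 0 := by decide
    simp [hS]
  · push_neg at hn
    lift n to Nat using (by omega : (0 : Int) ≤ n) with N
    have hN2 : 2 ≤ N := by exact_mod_cast hn
    simp only [Check, Check_alt]
    rw [kA_eq_totient _ hn, Int.toNat_natCast, SNT_nat]
    rw [if_neg (show ¬ ((N : Int) < 2) by exact_mod_cast Nat.not_lt.mpr hN2)]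
    have hB := phiLoop_spec N N 2 le_rfl (by omega)
      (fun q hq _ => hq.two_le) 1 le_rfl (by omega)
    rw [Nat.one_mul] at hB
    rw [hB]
    by_cases hp : Nat.Prime (Nat.totient N)
    · have hb := (isPrimeTrial_iff (Nat.totient N)).mpr hp
      simp [hp, hb]
    · have hb : isPrimeTrial (Nat.totient N) = false := by
        rw [Bool.eq_false_iff]
        intro hc; exact hp ((isPrimeTrial_iff _).mp hc)
      simp [hp, hb]
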